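-- pv_equiv track=rewrite | github.com/matheus-camilo-dev/meditation-sabbath-json-main | src/pt_meditation_lib.py | transform_month_names_to_numbers
-- ===== SOURCE A (Python) =====
-- def transform_month_names_to_numbers(date_temp) -> str:
--     month_names = [
--         "JANEIRO",
--         "FEVEREIRO",
--         "MARÇO",
--         "ABRIL",
--         "MAIO",
--         "JUNHO",
--         "JULHO",
--         "AGOSTO",
--         "SETEMBRO",
--         "OUTUBRO",
--         "NOVEMBRO",
--         "DEZEMBRO"
--     ]
--     for index, month_name in enumerate(month_names, start=1):
--         date_temp = date_temp.replace(month_name, str(index))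
--     return date_temp
-- ===== SOURCE B (Python) =====
-- def transform_month_names_to_numbers(date_temp) -> str:
--     months = {
--         "JANEIRO": "1", "FEVEREIRO": "2", "MARÇO": "3", "ABRIL": "4",
--         "MAIO": "5", "JUNHO": "6", "JULHO": "7", "AGOSTO": "8",
--         "SETEMBRO": "9", "OUTUBRO": "10", "NOVEMBRO": "11", "DEZEMBRO": "12",
--     }
--     out = []
--     i = 0
--     n = len(date_temp)
--     while i < n:
--         for name, num in months.items():
--             if date_temp.startswith(name, i):
--                 out.append(num)
--                 i += len(name)
--                 break
--         else:
--             out.append(date_temp[i])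
--             i += 1
--     return "".join(out)
-- ===== Notes on version B (the rewrite author's own statement) =====
-- stated objective: alternative
-- what changed: B makes a single left-to-right pass over the string, replacing at each position the (unique) month name that starts there via a name-to-number mapping, instead of A's twelve separate full-string replace passes.
-- intended difference: On strings where a NOVEMBRO or DEZEMBRO occurrence overlaps a following OUTUBRO occurrence (i.e. containing 'NOVEMBROUTUBRO' or 'DEZEMBROUTUBRO'), A's earlier OUTUBRO pass consumes the shared 'O' and returns e.g. 'NOVEMBR10', while B's standard leftmost-match pass returns '11UTUBRO'; leftmost-first is the intended resolution of this unspecified overlap corner. — e.g. on transform_month_names_to_numbers("NOVEMBROUTUBRO"): A returns "NOVEMBR10", B returns "11UTUBRO"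
import Mathlib
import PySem

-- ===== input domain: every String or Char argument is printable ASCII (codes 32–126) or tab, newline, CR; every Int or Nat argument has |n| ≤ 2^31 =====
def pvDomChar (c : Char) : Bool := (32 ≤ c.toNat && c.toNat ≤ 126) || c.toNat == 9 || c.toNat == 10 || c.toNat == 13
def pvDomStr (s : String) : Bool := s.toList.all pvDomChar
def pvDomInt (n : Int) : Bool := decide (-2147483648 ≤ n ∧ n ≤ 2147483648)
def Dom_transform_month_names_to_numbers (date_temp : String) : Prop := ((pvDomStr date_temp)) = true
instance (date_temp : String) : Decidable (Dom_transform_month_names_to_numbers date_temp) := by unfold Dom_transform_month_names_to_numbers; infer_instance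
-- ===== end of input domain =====

-- B replaces A's twelve full-string replace passes by one left-to-right scan with a
-- name → number mapping (alternative algorithm); A = B except on the overlap corner
-- described at D_ below, where B's leftmost-match resolution is the intended one.

-- ===== PORT A =====
def transform_month_names_to_numbers (date_temp : String) : String :=
  (PySem.List.enumerate
      ["JANEIRO", "FEVEREIRO", "MARÇO", "ABRIL", "MAIO", "JUNHO",
       "JULHO", "AGOSTO", "SETEMBRO", "OUTUBRO", "NOVEMBRO", "DEZEMBRO"] 1).foldl
    (fun d im => PySem.Str.replace d im.2 (PySem.Int.toStr im.1)) date_temp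

-- ===== PORT B =====
-- the months dict of Source B, each name split as head char :: rest (for structural recursion)
def pvMonths : List (Char × List Char × List Char) :=
  [('J', ['A','N','E','I','R','O'], ['1']),
   ('F', ['E','V','E','R','E','I','R','O'], ['2']),
   ('M', ['A','R','Ç','O'], ['3']),
   ('A', ['B','R','I','L'], ['4']),
   ('M', ['A','I','O'], ['5']),
   ('J', ['U','N','H','O'], ['6']),
   ('J', ['U','L','H','O'], ['7']),
   ('A', ['G','O','S','T','O'], ['8']),
   ('S', ['E','T','E','M','B','R','O'], ['9']),
   ('O', ['U','T','U','B','R','O'], ['1','0']),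
   ('N', ['O','V','E','M','B','R','O'], ['1','1']),
   ('D', ['E','Z','E','M','B','R','O'], ['1','2'])]

-- Source B's inner for-loop: first month name starting at the current position (if any)
def pvTryMonth : List (Char × List Char × List Char) → Char → List Char → Option (List Char × Nat)
  | [], _, _ => none
  | (o, rest, num) :: ms, c, t =>
    if c = o ∧ rest.isPrefixOf t then some (num, rest.length) else pvTryMonth ms c t

-- Source B's while-loop over the string
def pvScan : List Char → List Char
  | [] => []
  | c :: t =>
    match pvTryMonth pvMonths c t with
    | some (num, k) => num ++ pvScan (t.drop k)
    | none => c :: pvScan t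
termination_by s => s.length
decreasing_by all_goals (simp [List.length_drop]; try omega)

def transform_month_names_to_numbers_alt (date_temp : String) : String :=
  String.ofList (pvScan date_temp.toList)

-- ===== PRECONDITION & SPEC =====
-- the two overlap substrings of the D_ region, and a linear scanner deciding their presence
def pvNOV : List Char := "NOVEMBROUTUBRO".toList
def pvDEZ : List Char := "DEZEMBROUTUBRO".toList
def pvBadScan : List Char → Bool
  | [] => false
  | c :: t => pvNOV.isPrefixOf (c :: t) || pvDEZ.isPrefixOf (c :: t) || pvBadScan t

-- On strings where a NOVEMBRO or DEZEMBRO occurrence overlaps a following OUTUBRO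
-- occurrence (i.e. containing "NOVEMBROUTUBRO" or "DEZEMBROUTUBRO"), A's earlier
-- OUTUBRO pass consumes the shared 'O' (returning e.g. "NOVEMBR10") while B's standard
-- leftmost-match single pass returns "11UTUBRO"; leftmost-first is the intended
-- resolution of this unspecified overlap corner.
def D_transform_month_names_to_numbers (date_temp : String) : Prop :=
  pvBadScan date_temp.toList = true
instance (date_temp : String) : Decidable (D_transform_month_names_to_numbers date_temp) := by
  unfold D_transform_month_names_to_numbers; infer_instance

def Spec_transform_month_names_to_numbers (date_temp : String) (out : String) : Prop :=
  ¬ D_transform_month_names_to_numbers date_temp → out = transform_month_names_to_numbers_alt date_temp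
instance (date_temp : String) (out : String) : Decidable (Spec_transform_month_names_to_numbers date_temp out) := by
  unfold Spec_transform_month_names_to_numbers; infer_instance

def pvDiffWitness_transform_month_names_to_numbers : String := "NOVEMBROUTUBRO"
def pvDiffWitnessOut_transform_month_names_to_numbers : String × String := ("NOVEMBR10", "11UTUBRO")

-- ===== CLAIM (what is proved, stated in full; the proofs are below) =====
def Claim_unchanged_transform_month_names_to_numbers : Prop := ∀ (date_temp : String), Dom_transform_month_names_to_numbers date_temp → Spec_transform_month_names_to_numbers date_temp (transform_month_names_to_numbers date_temp)
def Claim_changed_transform_month_names_to_numbers : Prop := Dom_transform_month_names_to_numbers (pvDiffWitness_transform_month_names_to_numbers) ∧ D_transform_month_names_to_numbers (pvDiffWitness_transform_month_names_to_numbers) ∧ transform_month_names_to_numbers (pvDiffWitness_transform_month_names_to_numbers) = pvDiffWitnessOut_transform_month_names_to_numbers.1 ∧ transform_month_names_to_numbers_alt (pvDiffWitness_transform_month_names_to_numbers) = pvDiffWitnessOut_transform_month_names_to_numbers.2 ∧ pvDiffWitnessOut_transform_month_names_to_numbers.1 ≠ pvDiffWitnessOut_transform_month_names_to_numbers.2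
def Claim_exact_transform_month_names_to_numbers : Prop := ∀ (date_temp : String), Dom_transform_month_names_to_numbers date_temp → D_transform_month_names_to_numbers date_temp → transform_month_names_to_numbers date_temp ≠ transform_month_names_to_numbers_alt date_temp

-- ===== LEMMAS AND PROOFS =====

-- A-side, list level: the twelve replace passes as a fold
def pvRepl (d : List Char) (m : List Char × List Char) : List Char :=
  PySem.Chars.replace d m.1 m.2
def pvFoldRepl (ms : List (List Char × List Char)) (l : List Char) : List Char :=
  ms.foldl pvRepl l
def pvMonthsL : List (List Char × List Char) :=
  pvMonths.map (fun m => (m.1 :: m.2.1, m.2.2))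
def pvNth (i : Fin 12) : List Char × List Char :=
  pvMonthsL[i.val]'(by simpa [pvMonthsL, pvMonths] using i.isLt)
def pvBad (l : List Char) : Prop :=
  pvNOV <:+: l ∨ pvDEZ <:+: l

lemma pvNOV_ne_nil : pvNOV ≠ [] := by decide
lemma pvDEZ_ne_nil : pvDEZ ≠ [] := by decide

lemma pvBadScan_iff : ∀ l, pvBadScan l = true ↔ pvBad l := by
  intro l
  induction l with
  | nil =>
    rw [pvBadScan, pvBad]
    simp [List.infix_nil, pvNOV_ne_nil, pvDEZ_ne_nil]
  | cons c t ih =>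
    rw [pvBad, List.infix_cons_iff, List.infix_cons_iff]
    rw [pvBadScan]
    simp only [Bool.or_eq_true, List.isPrefixOf_iff_prefix, ih, pvBad]
    constructor
    · rintro ((h | h) | h | h)
      exacts [Or.inl (Or.inl h), Or.inr (Or.inl h), Or.inl (Or.inr h), Or.inr (Or.inr h)]
    · rintro ((h | h) | (h | h))
      exacts [Or.inl (Or.inl h), Or.inr (Or.inl h), Or.inl (Or.inr h), Or.inr (Or.inr h)]
def pvGood (ms : List (List Char × List Char)) : Prop :=
  ∀ m ∈ ms, m.1 ≠ [] ∧ m.1.all (fun ch => !ch.isDigit) ∧ m.2 ≠ [] ∧ m.2.all Char.isDigit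

lemma pvGood_monthsL : pvGood pvMonthsL := by unfold pvGood pvMonthsL pvMonths; decide

-- equations of PySem.Chars.replace.go
lemma go_zero (old new l acc) :
    PySem.Chars.replace.go old new 0 l acc = acc.reverse ++ l := by
  rw [PySem.Chars.replace.go.eq_def]
lemma go_succ_nil (old new f acc) :
    PySem.Chars.replace.go old new (f+1) [] acc = acc.reverse := by
  rw [PySem.Chars.replace.go.eq_def]
lemma go_succ_cons (old new f c t acc) :
    PySem.Chars.replace.go old new (f+1) (c :: t) acc =
      if old.isPrefixOf (c :: t) then
        PySem.Chars.replace.go old new f (List.drop old.length (c :: t)) (new.reverse ++ acc)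
      else PySem.Chars.replace.go old new f t (c :: acc) := by
  rw [PySem.Chars.replace.go.eq_def]

lemma go_acc (old new : List Char) :
    ∀ f l acc, PySem.Chars.replace.go old new f l acc
      = acc.reverse ++ PySem.Chars.replace.go old new f l [] := by
  intro f
  induction f with
  | zero => intro l acc; rw [go_zero, go_zero]; simp
  | succ f ih =>
    intro l acc
    cases l with
    | nil => rw [go_succ_nil, go_succ_nil]; simp
    | cons c t =>
      rw [go_succ_cons, go_succ_cons]
      by_cases h : old.isPrefixOf (c :: t)
      · rw [if_pos h, if_pos h, ih _ (new.reverse ++ acc), ih _ (new.reverse ++ [])]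
        simp
      · rw [if_neg h, if_neg h, ih _ (c :: acc), ih _ [c]]
        simp

lemma go_fuel (o : Char) (old' new : List Char) :
    ∀ f f' l acc, l.length ≤ f → l.length ≤ f' →
      PySem.Chars.replace.go (o :: old') new f l acc
        = PySem.Chars.replace.go (o :: old') new f' l acc := by
  intro f
  induction f with
  | zero =>
    intro f' l acc h h'
    cases l with
    | nil =>
      cases f' with
      | zero => rfl
      | succ f' => rw [go_zero, go_succ_nil]; simp
    | cons c t => simp at h
  | succ f ih =>
    intro f' l acc h h'
    cases l with
    | nil =>
      cases f' with
      | zero => rw [go_zero, go_succ_nil]; simp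
      | succ f'' => rw [go_succ_nil, go_succ_nil]
    | cons c t =>
      cases f' with
      | zero => simp at h'
      | succ f'' =>
        rw [go_succ_cons, go_succ_cons]
        by_cases hp : (o :: old').isPrefixOf (c :: t)
        · rw [if_pos hp, if_pos hp]
          apply ih <;> (simp at h h' ⊢; omega)
        · rw [if_neg hp, if_neg hp]
          apply ih <;> (simp at h h' ⊢; omega)

lemma replace_nil (o : Char) (old' new : List Char) :
    PySem.Chars.replace [] (o :: old') new = [] := by
  simp [PySem.Chars.replace, go_zero]

lemma replace_cons_neg (o : Char) (old' new : List Char) (c : Char) (t : List Char)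
    (h : ¬ (o :: old') <+: (c :: t)) :
    PySem.Chars.replace (c :: t) (o :: old') new
      = c :: PySem.Chars.replace t (o :: old') new := by
  have hpf : (o :: old').isPrefixOf (c :: t) = false := by
    rw [Bool.eq_false_iff]
    intro hb
    exact h (List.isPrefixOf_iff_prefix.mp hb)
  have e1 : PySem.Chars.replace (c :: t) (o :: old') new
      = PySem.Chars.replace.go (o :: old') new (t.length + 1) (c :: t) [] := by
    simp [PySem.Chars.replace]
  have e2 : PySem.Chars.replace t (o :: old') new
      = PySem.Chars.replace.go (o :: old') new t.length t [] := by
    simp [PySem.Chars.replace]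
  rw [e1, e2, go_succ_cons, hpf]
  simp only [Bool.false_eq_true, if_false]
  rw [go_acc]
  simp

lemma replace_pref (o : Char) (old' new w : List Char) :
    PySem.Chars.replace ((o :: old') ++ w) (o :: old') new
      = new ++ PySem.Chars.replace w (o :: old') new := by
  have hpf : (o :: old').isPrefixOf (o :: (old' ++ w)) = true := by
    apply List.isPrefixOf_iff_prefix.mpr
    rw [show o :: (old' ++ w) = (o :: old') ++ w from rfl]
    exact List.prefix_append _ _
  have e1 : PySem.Chars.replace ((o :: old') ++ w) (o :: old') new
      = PySem.Chars.replace.go (o :: old') new ((old'.length + w.length) + 1)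
          (o :: (old' ++ w)) [] := by
    simp [PySem.Chars.replace]
  have e2 : PySem.Chars.replace w (o :: old') new
      = PySem.Chars.replace.go (o :: old') new w.length w [] := by
    simp [PySem.Chars.replace]
  rw [e1, e2, go_succ_cons, hpf]
  simp only [if_true]
  rw [show List.drop (o :: old').length (o :: (old' ++ w)) = w by
    simp]
  rw [go_acc]
  simp only [List.reverse_reverse, List.append_nil]
  congr 1
  exact go_fuel o old' new _ _ w [] (by simp) (le_refl _)

-- a prefix of an append is a prefix of the left part, or extends it
lemma prefix_append_split (a p v : List Char) (h : a <+: p ++ v) :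
    a <+: p ∨ (p <+: a ∧ a.drop p.length <+: v) := by
  induction p generalizing a with
  | nil => right; simpa using h
  | cons x p' ih =>
    cases a with
    | nil => left; exact List.nil_prefix
    | cons y a' =>
      rw [List.cons_append, List.cons_prefix_cons] at h
      obtain ⟨rfl, h2⟩ := h
      rcases ih a' h2 with h3 | ⟨h3, h4⟩
      · left; exact List.cons_prefix_cons.mpr ⟨rfl, h3⟩
      · right; exact ⟨List.cons_prefix_cons.mpr ⟨rfl, h3⟩, by simpa using h4⟩

-- a digit-free prefix of a replaced string is a prefix of the original
lemma prefix_transfer (o : Char) (old' : List Char) (d : Char) (num' : List Char)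
    (hnum : (d :: num').all Char.isDigit) :
    ∀ n u w, u.length ≤ n → w.all (fun ch => !ch.isDigit) →
      w <+: PySem.Chars.replace u (o :: old') (d :: num') → w <+: u := by
  intro n
  induction n with
  | zero =>
    intro u w h hw hpre
    have hu : u = [] := by cases u with | nil => rfl | cons a b => simp at h
    subst hu
    rwa [replace_nil] at hpre
  | succ n ih =>
    intro u w h hw hpre
    cases u with
    | nil => rwa [replace_nil] at hpre
    | cons c t =>
      by_cases hp : (o :: old') <+: (c :: t)
      · obtain ⟨v, hv⟩ := hp
        rw [← hv, replace_pref] at hpre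
        cases w with
        | nil => exact List.nil_prefix
        | cons e w' =>
          rw [List.cons_append, List.cons_prefix_cons] at hpre
          obtain ⟨rfl, -⟩ := hpre
          simp only [List.all_cons, Bool.and_eq_true] at hw hnum
          simp_all
      · rw [replace_cons_neg _ _ _ _ _ hp] at hpre
        cases w with
        | nil => exact List.nil_prefix
        | cons e w' =>
          rw [List.cons_prefix_cons] at hpre
          obtain ⟨rfl, h2⟩ := hpre
          have hwa : w'.all (fun ch => !ch.isDigit) := by
            simp only [List.all_cons, Bool.and_eq_true] at hw
            exact hw.2
          exact List.cons_prefix_cons.mpr ⟨rfl, ih t w' (by simp at h; omega) hwa h2⟩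

lemma fold_nil (ms : List (List Char × List Char)) (hms : pvGood ms) :
    pvFoldRepl ms [] = [] := by
  induction ms with
  | nil => rfl
  | cons m ms' ih =>
    have hms' : pvGood ms' := fun x hx => hms x (List.mem_cons_of_mem _ hx)
    obtain ⟨h1, -, -, -⟩ := hms m List.mem_cons_self
    obtain ⟨o, old', ho⟩ := List.exists_cons_of_ne_nil h1
    show pvFoldRepl ms' (pvRepl [] m) = []
    rw [pvRepl, ho, replace_nil]
    exact ih hms'

lemma commute_skip (ms : List (List Char × List Char)) (hms : pvGood ms) :
    ∀ t c, (∀ m ∈ ms, ¬ m.1 <+: (c :: t)) →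
      pvFoldRepl ms (c :: t) = c :: pvFoldRepl ms t := by
  induction ms with
  | nil => intro t c _; rfl
  | cons m ms' ih =>
    intro t c h
    have hms' : pvGood ms' := fun x hx => hms x (List.mem_cons_of_mem _ hx)
    obtain ⟨h1, h2, h3, h4⟩ := hms m List.mem_cons_self
    obtain ⟨o, old', ho⟩ := List.exists_cons_of_ne_nil h1
    obtain ⟨d, num', hd⟩ := List.exists_cons_of_ne_nil h3
    have hstep : pvRepl (c :: t) m = c :: pvRepl t m := by
      unfold pvRepl
      rw [ho]
      exact replace_cons_neg o old' m.2 c t (ho ▸ h m List.mem_cons_self)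
    show pvFoldRepl ms' (pvRepl (c :: t) m) = c :: pvFoldRepl ms' (pvRepl t m)
    rw [hstep]
    apply ih hms'
    intro m' hm' hpref
    obtain ⟨g1, g2, -, -⟩ := hms m' (List.mem_cons_of_mem _ hm')
    obtain ⟨e, w, he⟩ := List.exists_cons_of_ne_nil g1
    rw [he, List.cons_prefix_cons] at hpref
    obtain ⟨rfl, hw⟩ := hpref
    have hwt : w <+: t := by
      have hwall : w.all (fun ch => !ch.isDigit) := by
        rw [he] at g2
        simp only [List.all_cons, Bool.and_eq_true] at g2
        exact g2.2
      unfold pvRepl at hw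
      rw [ho, hd] at hw
      exact prefix_transfer o old' d num' (hd ▸ h4) t.length t w (le_refl _) hwall hw
    exact h m' (List.mem_cons_of_mem _ hm') (by rw [he]; exact List.cons_prefix_cons.mpr ⟨rfl, hwt⟩)

lemma commute_pre (ms : List (List Char × List Char)) (hms : pvGood ms) :
    ∀ p t, (∀ m ∈ ms, ∀ j < p.length, ¬ m.1 <+: (p.drop j ++ t)) →
      pvFoldRepl ms (p ++ t) = p ++ pvFoldRepl ms t := by
  intro p
  induction p with
  | nil => intro t _; rfl
  | cons c p' ih =>
    intro t h
    rw [List.cons_append]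
    rw [commute_skip ms hms (p' ++ t) c (by
      intro m hm
      have := h m hm 0 (by simp)
      simpa using this)]
    rw [ih t (by
      intro m hm j hj
      have := h m hm (j+1) (by simp; omega)
      simpa using this)]
    rfl

-- no month name is a prefix of what remains of another month name after j ≥ 0 drops
-- (for months strictly earlier in the list)
lemma pvFactA : ∀ i : Fin 12, ∀ m ∈ pvMonthsL.take i.val, ∀ j < (pvNth i).1.length,
    ¬ m.1 <+: (pvNth i).1.drop j := by decide

-- the only way a dropped month name is a prefix of an earlier month name is the
-- OUTUBRO-after-NOVEMBRO/DEZEMBRO overlap, which produces exactly the D_ substrings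
lemma pvFactB : ∀ i : Fin 12, ∀ m ∈ pvMonthsL.take i.val, ∀ j < (pvNth i).1.length,
    (pvNth i).1.drop j <+: m.1 →
      ((pvNth i).1 ++ m.1.drop ((pvNth i).1.length - j) = pvNOV ∨
       (pvNth i).1 ++ m.1.drop ((pvNth i).1.length - j) = pvDEZ) := by decide

lemma notPref_digit (a : List Char) (ha : a ≠ []) (ha2 : a.all (fun ch => !ch.isDigit))
    (num : List Char) (hd : num.all Char.isDigit) (j : Nat) (hj : j < num.length)
    (Y : List Char) : ¬ a <+: num.drop j ++ Y := by
  intro h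
  obtain ⟨e, a', rfl⟩ := List.exists_cons_of_ne_nil ha
  cases hnd : num.drop j with
  | nil => rw [List.drop_eq_nil_iff] at hnd; omega
  | cons d r =>
    rw [hnd, List.cons_append, List.cons_prefix_cons] at h
    obtain ⟨rfl, -⟩ := h
    have hdn : e ∈ num := List.drop_subset j num (hnd ▸ List.mem_cons_self)
    have : e.isDigit := List.all_eq_true.mp hd e hdn
    have : ¬ e.isDigit := by simpa using (List.all_eq_true.mp ha2 e List.mem_cons_self)
    simp_all

lemma pvStep (i : Fin 12) (u : List Char)
    (hbad : ¬ pvNOV <+: ((pvNth i).1 ++ u) ∧ ¬ pvDEZ <+: ((pvNth i).1 ++ u)) :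
    pvFoldRepl pvMonthsL ((pvNth i).1 ++ u) = (pvNth i).2 ++ pvFoldRepl pvMonthsL u := by
  have hlen : i.val < pvMonthsL.length := by
    simpa [pvMonthsL, pvMonths] using i.isLt
  have hsplit : pvMonthsL = pvMonthsL.take i.val ++ pvNth i :: pvMonthsL.drop (i.val + 1) := by
    conv_lhs => rw [← List.take_append_drop i.val pvMonthsL]
    congr 1
    exact (List.getElem_cons_drop hlen).symm
  have hGpre : pvGood (pvMonthsL.take i.val) :=
    fun m hm => pvGood_monthsL m (List.take_subset _ _ hm)
  have hGpost : pvGood (pvMonthsL.drop (i.val + 1)) :=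
    fun m hm => pvGood_monthsL m (List.drop_subset _ _ hm)
  obtain ⟨hne, hnd, hne2, hdg⟩ := pvGood_monthsL (pvNth i) (by
    rw [hsplit]; exact List.mem_append_right _ List.mem_cons_self)
  obtain ⟨o, old', ho⟩ := List.exists_cons_of_ne_nil hne
  -- condition for commuting the earlier passes over the matched name
  have hcond : ∀ m ∈ pvMonthsL.take i.val, ∀ j < (pvNth i).1.length,
      ¬ m.1 <+: ((pvNth i).1.drop j ++ u) := by
    intro m hm j hj hpref
    rcases prefix_append_split _ _ _ hpref with hA | ⟨hB, hC⟩
    · exact pvFactA i m hm j hj hA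
    · have hlen2 : ((pvNth i).1.drop j).length = (pvNth i).1.length - j := by simp
      have hC' : m.1.drop ((pvNth i).1.length - j) <+: u := by rw [← hlen2]; exact hC
      rcases pvFactB i m hm j hj hB with hN | hN
      · exact hbad.1 (by
          rw [← hN]
          exact (List.prefix_append_right_inj _).mpr hC')
      · exact hbad.2 (by
          rw [← hN]
          exact (List.prefix_append_right_inj _).mpr hC')
  conv_lhs => rw [hsplit]
  conv_rhs => rw [hsplit]
  unfold pvFoldRepl
  rw [List.foldl_append, List.foldl_cons, List.foldl_append, List.foldl_cons]
  rw [show List.foldl pvRepl ((pvNth i).1 ++ u) (pvMonthsL.take i.val)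
        = (pvNth i).1 ++ List.foldl pvRepl u (pvMonthsL.take i.val) from
    commute_pre (pvMonthsL.take i.val) hGpre (pvNth i).1 u hcond]
  rw [show pvRepl ((pvNth i).1 ++ List.foldl pvRepl u (pvMonthsL.take i.val)) (pvNth i)
        = (pvNth i).2 ++ pvRepl (List.foldl pvRepl u (pvMonthsL.take i.val)) (pvNth i) from by
    unfold pvRepl; rw [ho]; exact replace_pref o old' (pvNth i).2 _]
  exact commute_pre (pvMonthsL.drop (i.val + 1)) hGpost (pvNth i).2 _ (by
    intro m hm j hj
    obtain ⟨g1, g2, -, -⟩ := hGpost m hm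
    exact notPref_digit m.1 g1 g2 (pvNth i).2 hdg j hj _)

lemma tryMonth_none :
    ∀ ms (c : Char) (t : List Char), pvTryMonth ms c t = none →
      ∀ p ∈ ms, ¬ ((p.1 :: p.2.1) <+: c :: t) := by
  intro ms
  induction ms with
  | nil => intro c t _ p hp; simp at hp
  | cons m ms' ih =>
    intro c t h p hp
    obtain ⟨o, rest, num⟩ := m
    rw [pvTryMonth] at h
    split_ifs at h with hc
    rcases List.mem_cons.mp hp with rfl | hp'
    · intro hpref
      rw [List.cons_prefix_cons] at hpref
      exact hc ⟨hpref.1.symm, List.isPrefixOf_iff_prefix.mpr hpref.2⟩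
    · exact ih c t h p hp'

lemma pvBad_of_infix {u l : List Char} (h : u <:+: l) : pvBad u → pvBad l :=
  fun hx => hx.imp (fun h' => h'.trans h) (fun h' => h'.trans h)

lemma tryMonth_some :
    ∀ ms (c : Char) (t num : List Char) (k : Nat), pvTryMonth ms c t = some (num, k) →
      ∃ o rest, (o, rest, num) ∈ ms ∧ c = o ∧ rest <+: t ∧ k = rest.length := by
  intro ms
  induction ms with
  | nil => intro c t num k h; simp [pvTryMonth] at h
  | cons m ms' ih =>
    intro c t num k h
    obtain ⟨o, rest, num'⟩ := m
    rw [pvTryMonth] at h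
    split_ifs at h with hc
    · obtain ⟨h1, h2⟩ := Prod.mk.inj (Option.some.inj h)
      exact ⟨o, rest, by subst h1; exact List.mem_cons_self, hc.1,
        List.isPrefixOf_iff_prefix.mp hc.2, h2.symm⟩
    · obtain ⟨o', rest', hm, h1, h2, h3⟩ := ih c t num k h
      exact ⟨o', rest', List.mem_cons_of_mem _ hm, h1, h2, h3⟩

lemma pvMain : ∀ n l, l.length ≤ n → ¬ pvBad l → pvFoldRepl pvMonthsL l = pvScan l := by
  intro n
  induction n with
  | zero =>
    intro l h _
    have hl : l = [] := by cases l with | nil => rfl | cons a b => simp at h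
    subst hl
    rw [fold_nil pvMonthsL pvGood_monthsL, pvScan]
  | succ n ih =>
    intro l h hbad
    cases l with
    | nil => rw [fold_nil pvMonthsL pvGood_monthsL, pvScan]
    | cons c t =>
      cases htry : pvTryMonth pvMonths c t with
      | none =>
        have hnp : ∀ m ∈ pvMonthsL, ¬ m.1 <+: (c :: t) := by
          intro m hm
          obtain ⟨p, hp, rfl⟩ := List.mem_map.mp hm
          exact tryMonth_none pvMonths c t htry p hp
        rw [commute_skip pvMonthsL pvGood_monthsL t c hnp]
        rw [ih t (by simp at h ⊢; omega)
          (fun hx => hbad (pvBad_of_infix (List.suffix_cons c t).isInfix hx))]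
        rw [pvScan, htry]
      | some val =>
        obtain ⟨num, k⟩ := val
        obtain ⟨o, rest, hmem, hco, ⟨u, hu⟩, rfl⟩ :=
          tryMonth_some pvMonths c t num k htry
        subst hco
        have hmemL : (c :: rest, num) ∈ pvMonthsL :=
          List.mem_map.mpr ⟨(c, rest, num), hmem, rfl⟩
        obtain ⟨nidx, hn, hgetn⟩ := List.mem_iff_getElem.mp hmemL
        have hn12 : nidx < 12 := by
          have : pvMonthsL.length = 12 := by simp [pvMonthsL, pvMonths]
          omega
        set i : Fin 12 := ⟨nidx, hn12⟩ with hi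
        have hpv : pvNth i = (c :: rest, num) := by
          rw [pvNth]
          exact hgetn
        have hct : c :: t = (pvNth i).1 ++ u := by
          rw [hpv, ← hu]; rfl
        have hdrop : t.drop rest.length = u := by
          rw [← hu]; exact List.drop_left
        have hulen : u.length ≤ n := by
          have : t.length ≤ n := by simpa using Nat.lt_succ_iff.mp (by simpa using h)
          have : u.length ≤ t.length := by rw [← hu]; simp
          omega
        have hubad : ¬ pvBad u := fun hx => hbad (pvBad_of_infix
          ⟨c :: rest, [], by simp [← hu]⟩ hx)
        have hnb : ¬ pvBad ((pvNth i).1 ++ u) := hct ▸ hbad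
        rw [pvScan, htry]
        simp only [hdrop]
        rw [hct, pvStep i u ⟨fun hp => hnb (Or.inl hp.isInfix),
          fun hp => hnb (Or.inr hp.isInfix)⟩, hpv]
        rw [ih u hulen hubad]


-- ==== tightness: A ≠ B everywhere inside D_ ====
def nov8 : List Char := ['N','O','V','E','M','B','R','O']
def dez8 : List Char := ['D','E','Z','E','M','B','R','O']
def ut6  : List Char := ['U','T','U','B','R','O']
def out7 : List Char := ['O','U','T','U','B','R','O']
def nbr7 : List Char := ['N','O','V','E','M','B','R']
def dbr7 : List Char := ['D','E','Z','E','M','B','R']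

lemma foldRepl_singleton (m : List Char × List Char) (s : List Char) :
    pvFoldRepl [m] s = pvRepl s m := rfl

lemma pvRepl_out (w : List Char) :
    pvRepl (out7 ++ w) (out7, ['1','0']) = ['1','0'] ++ pvRepl w (out7, ['1','0']) :=
  replace_pref 'O' ut6 ['1','0'] w

lemma notPref_split {a p : List Char} (x : List Char) (h1 : ¬ a <+: p) (h2 : ¬ p <+: a) :
    ¬ a <+: p ++ x := fun h => (prefix_append_split a p x h).elim h1 (fun hh => h2 hh.1)

lemma f_take9_nov : ∀ m ∈ pvMonthsL.take 9, ∀ j < nov8.length,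
    ¬ m.1 <+: nov8.drop j ∧ ¬ nov8.drop j <+: m.1 := by decide
lemma f_take9_dez : ∀ m ∈ pvMonthsL.take 9, ∀ j < dez8.length,
    ¬ m.1 <+: dez8.drop j ∧ ¬ dez8.drop j <+: m.1 := by decide
lemma f_take9_ut : ∀ m ∈ pvMonthsL.take 9, ∀ j < ut6.length,
    ¬ m.1 <+: ut6.drop j ∧ ¬ ut6.drop j <+: m.1 := by decide
lemma f_out_nbr : ∀ j < nbr7.length, ¬ out7 <+: nbr7.drop j ∧ ¬ nbr7.drop j <+: out7 := by decide
lemma f_out_dbr : ∀ j < dbr7.length, ¬ out7 <+: dbr7.drop j ∧ ¬ dbr7.drop j <+: out7 := by decide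
lemma f_last_nov : ∀ m ∈ pvMonthsL.drop 10,
    ¬ m.1 <+: nbr7 ++ ['1','0'] ∧ ¬ nbr7 ++ ['1','0'] <+: m.1 := by decide
lemma f_last_dez : ∀ m ∈ pvMonthsL.drop 10,
    ¬ m.1 <+: dbr7 ++ ['1','0'] ∧ ¬ dbr7 ++ ['1','0'] <+: m.1 := by decide
lemma factPP : ∀ a ∈ pvMonthsL, ∀ b ∈ pvMonthsL, a.1 <+: b.1 → a = b := by decide
lemma factE : ∀ i : Fin 12, ∀ j < (pvNth i).1.length, 0 < j →
    ¬ (pvNth i).1.drop j <+: pvNOV ∧ ¬ (pvNth i).1.drop j <+: pvDEZ := by decide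
lemma factLen : ∀ i : Fin 12, (pvNth i).1.length ≤ 9 := by decide

lemma hG_take9 : pvGood (pvMonthsL.take 9) :=
  fun m hm => pvGood_monthsL m (List.take_subset _ _ hm)
lemma hG_out : pvGood [(out7, ['1','0'])] := by unfold pvGood out7; decide
lemma hG_drop10 : pvGood (pvMonthsL.drop 10) :=
  fun m hm => pvGood_monthsL m (List.drop_subset _ _ hm)

-- after the earlier passes and the OUTUBRO pass, a string starting with the
-- NOVEMBRO/DEZEMBRO overlap keeps its head letter through A's pipeline
set_option maxHeartbeats 1000000 in
lemma tightHeadN (v : List Char) :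
    ∃ z, pvFoldRepl pvMonthsL (nov8 ++ (ut6 ++ v)) = 'N' :: z := by
  have e1 : pvFoldRepl pvMonthsL (nov8 ++ (ut6 ++ v))
      = pvFoldRepl (pvMonthsL.drop 9) (pvFoldRepl (pvMonthsL.take 9) (nov8 ++ (ut6 ++ v))) := by
    rw [pvFoldRepl, pvFoldRepl, pvFoldRepl, ← List.foldl_append, List.take_append_drop]
  have c1 : pvFoldRepl (pvMonthsL.take 9) (nov8 ++ (ut6 ++ v))
      = nov8 ++ (ut6 ++ pvFoldRepl (pvMonthsL.take 9) v) := by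
    rw [commute_pre _ hG_take9 nov8 (ut6 ++ v) (fun m hm j hj =>
      notPref_split _ (f_take9_nov m hm j hj).1 (f_take9_nov m hm j hj).2)]
    rw [commute_pre _ hG_take9 ut6 v (fun m hm j hj =>
      notPref_split _ (f_take9_ut m hm j hj).1 (f_take9_ut m hm j hj).2)]
  set w := pvFoldRepl (pvMonthsL.take 9) v with hw
  have hre : nov8 ++ (ut6 ++ w) = nbr7 ++ (out7 ++ w) := by
    have hcl : nov8 ++ ut6 = nbr7 ++ out7 := by decide
    rw [← List.append_assoc, hcl, List.append_assoc]
  have c2 : pvFoldRepl [(out7, ['1','0'])] (nbr7 ++ (out7 ++ w))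
      = nbr7 ++ (['1','0'] ++ pvRepl w (out7, ['1','0'])) := by
    rw [commute_pre _ hG_out nbr7 (out7 ++ w) (fun m hm j hj => by
      have hm' : m = (out7, ['1','0']) := by simpa using hm
      subst hm'
      exact notPref_split _ (f_out_nbr j hj).1 (f_out_nbr j hj).2), foldRepl_singleton,
      pvRepl_out]
  have c3 : pvFoldRepl (pvMonthsL.drop 10)
        ((nbr7 ++ ['1','0']) ++ pvRepl w (out7, ['1','0']))
      = 'N' :: pvFoldRepl (pvMonthsL.drop 10)
          (['O','V','E','M','B','R','1','0'] ++ pvRepl w (out7, ['1','0'])) := by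
    exact commute_skip _ hG_drop10 _ 'N' (fun m hm =>
      notPref_split _ (f_last_nov m hm).1 (f_last_nov m hm).2)
  have hsplit9 : pvFoldRepl (pvMonthsL.drop 9) (nbr7 ++ (out7 ++ w))
      = pvFoldRepl (pvMonthsL.drop 10) (pvFoldRepl [(out7, ['1','0'])] (nbr7 ++ (out7 ++ w))) := by
    have : pvMonthsL.drop 9 = [(out7, ['1','0'])] ++ pvMonthsL.drop 10 := by decide
    rw [this, pvFoldRepl, pvFoldRepl, pvFoldRepl, List.foldl_append]
  refine ⟨pvFoldRepl (pvMonthsL.drop 10) (['O','V','E','M','B','R','1','0'] ++ pvRepl w (out7, ['1','0'])), ?_⟩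
  rw [e1, c1, hre, hsplit9, c2, ← List.append_assoc]
  exact c3

set_option maxHeartbeats 1000000 in
lemma tightHeadD (v : List Char) :
    ∃ z, pvFoldRepl pvMonthsL (dez8 ++ (ut6 ++ v)) = 'D' :: z := by
  have e1 : pvFoldRepl pvMonthsL (dez8 ++ (ut6 ++ v))
      = pvFoldRepl (pvMonthsL.drop 9) (pvFoldRepl (pvMonthsL.take 9) (dez8 ++ (ut6 ++ v))) := by
    rw [pvFoldRepl, pvFoldRepl, pvFoldRepl, ← List.foldl_append, List.take_append_drop]
  have c1 : pvFoldRepl (pvMonthsL.take 9) (dez8 ++ (ut6 ++ v))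
      = dez8 ++ (ut6 ++ pvFoldRepl (pvMonthsL.take 9) v) := by
    rw [commute_pre _ hG_take9 dez8 (ut6 ++ v) (fun m hm j hj =>
      notPref_split _ (f_take9_dez m hm j hj).1 (f_take9_dez m hm j hj).2)]
    rw [commute_pre _ hG_take9 ut6 v (fun m hm j hj =>
      notPref_split _ (f_take9_ut m hm j hj).1 (f_take9_ut m hm j hj).2)]
  set w := pvFoldRepl (pvMonthsL.take 9) v with hw
  have hre : dez8 ++ (ut6 ++ w) = dbr7 ++ (out7 ++ w) := by
    have hcl : dez8 ++ ut6 = dbr7 ++ out7 := by decide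
    rw [← List.append_assoc, hcl, List.append_assoc]
  have c2 : pvFoldRepl [(out7, ['1','0'])] (dbr7 ++ (out7 ++ w))
      = dbr7 ++ (['1','0'] ++ pvRepl w (out7, ['1','0'])) := by
    rw [commute_pre _ hG_out dbr7 (out7 ++ w) (fun m hm j hj => by
      have hm' : m = (out7, ['1','0']) := by simpa using hm
      subst hm'
      exact notPref_split _ (f_out_dbr j hj).1 (f_out_dbr j hj).2), foldRepl_singleton,
      pvRepl_out]
  have c3 : pvFoldRepl (pvMonthsL.drop 10)
        ((dbr7 ++ ['1','0']) ++ pvRepl w (out7, ['1','0']))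
      = 'D' :: pvFoldRepl (pvMonthsL.drop 10)
          (['E','Z','E','M','B','R','1','0'] ++ pvRepl w (out7, ['1','0'])) := by
    exact commute_skip _ hG_drop10 _ 'D' (fun m hm =>
      notPref_split _ (f_last_dez m hm).1 (f_last_dez m hm).2)
  have hsplit9 : pvFoldRepl (pvMonthsL.drop 9) (dbr7 ++ (out7 ++ w))
      = pvFoldRepl (pvMonthsL.drop 10) (pvFoldRepl [(out7, ['1','0'])] (dbr7 ++ (out7 ++ w))) := by
    have : pvMonthsL.drop 9 = [(out7, ['1','0'])] ++ pvMonthsL.drop 10 := by decide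
    rw [this, pvFoldRepl, pvFoldRepl, pvFoldRepl, List.foldl_append]
  refine ⟨pvFoldRepl (pvMonthsL.drop 10) (['E','Z','E','M','B','R','1','0'] ++ pvRepl w (out7, ['1','0'])), ?_⟩
  rw [e1, c1, hre, hsplit9, c2, ← List.append_assoc]
  exact c3

-- an overlap substring of name_i ++ u that is not a prefix lies entirely in u
lemma bad_inside (i : Fin 12) (u : List Char) (hb : pvBad ((pvNth i).1 ++ u))
    (h1 : ¬ pvNOV <+: ((pvNth i).1 ++ u)) (h2 : ¬ pvDEZ <+: ((pvNth i).1 ++ u)) :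
    pvBad u := by
  have main : ∀ (x : List Char), x = pvNOV ∨ x = pvDEZ → x <:+: ((pvNth i).1 ++ u) →
      ¬ x <+: ((pvNth i).1 ++ u) → x <:+: u := by
    intro x hx hinf hnp
    obtain ⟨j, hj⟩ := (PySem.Chars.exists_prefix_drop_iff_isIn x _).mpr
      ((PySem.Chars.isIn_iff_infix x _).mpr hinf)
    rcases Nat.lt_or_ge j (pvNth i).1.length with hlt | hge
    · rcases Nat.eq_zero_or_pos j with rfl | hpos
      · exact absurd (by simpa using hj) hnp
      · rw [List.drop_append_of_le_length (le_of_lt hlt)] at hj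
        rcases prefix_append_split _ _ _ hj with hA | ⟨hB, -⟩
        · have hxlen : x.length = 14 := by rcases hx with rfl | rfl <;> decide
          have := hA.length_le
          have hni : (pvNth i).1.length ≤ 9 := factLen i
          simp only [List.length_drop] at this
          omega
        · rcases hx with rfl | rfl
          · exact absurd hB (factE i j hlt hpos).1
          · exact absurd hB (factE i j hlt hpos).2
    · have : ((pvNth i).1 ++ u).drop j = u.drop (j - (pvNth i).1.length) := by
        rw [show j = (pvNth i).1.length + (j - (pvNth i).1.length) by omega]
        simp [List.drop_append]
      rw [this] at hj
      exact hj.isInfix.trans (List.drop_suffix _ u).isInfix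
  rcases hb with h | h
  · exact Or.inl (main pvNOV (Or.inl rfl) h h1)
  · exact Or.inr (main pvDEZ (Or.inr rfl) h h2)

lemma pvTight : ∀ n l, l.length ≤ n → pvBad l → pvFoldRepl pvMonthsL l ≠ pvScan l := by
  intro n
  induction n with
  | zero =>
    intro l h hb
    have hl : l = [] := by cases l with | nil => rfl | cons a b => simp at h
    subst hl
    rcases hb with h' | h' <;> rw [List.infix_nil] at h'
    · exact absurd h' pvNOV_ne_nil
    · exact absurd h' pvDEZ_ne_nil
  | succ n ih =>
    intro l h hb
    cases l with
    | nil =>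
      rcases hb with h' | h' <;> rw [List.infix_nil] at h'
      · exact absurd h' pvNOV_ne_nil
      · exact absurd h' pvDEZ_ne_nil
    | cons c t =>
      cases htry : pvTryMonth pvMonths c t with
      | none =>
        have hnp : ∀ m ∈ pvMonthsL, ¬ m.1 <+: (c :: t) := by
          intro m hm
          obtain ⟨p, hp, rfl⟩ := List.mem_map.mp hm
          exact tryMonth_none pvMonths c t htry p hp
        have hnN : ¬ pvNOV <+: (c :: t) := fun hp => hnp (nov8, ['1','1']) (by decide)
          ((show nov8 <+: pvNOV by decide).trans hp)
        have hnD : ¬ pvDEZ <+: (c :: t) := fun hp => hnp (dez8, ['1','2']) (by decide)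
          ((show dez8 <+: pvDEZ by decide).trans hp)
        have hbt : pvBad t := by
          rcases hb with h' | h'
          · exact Or.inl ((List.infix_cons_iff.mp h').resolve_left hnN)
          · exact Or.inr ((List.infix_cons_iff.mp h').resolve_left hnD)
        rw [commute_skip pvMonthsL pvGood_monthsL t c hnp, pvScan, htry]
        intro heq
        exact ih t (by simp at h ⊢; omega) hbt (List.cons.inj heq).2
      | some val =>
        obtain ⟨num, k⟩ := val
        obtain ⟨o, rest, hmem, hco, ⟨u, hu⟩, rfl⟩ :=
          tryMonth_some pvMonths c t num k htry
        subst hco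
        have hmemL : (c :: rest, num) ∈ pvMonthsL :=
          List.mem_map.mpr ⟨(c, rest, num), hmem, rfl⟩
        have hpref : (c :: rest) <+: (c :: t) := by
          rw [← hu]
          exact List.cons_prefix_cons.mpr ⟨rfl, List.prefix_append _ _⟩
        by_cases hN : pvNOV <+: (c :: t)
        · -- the matched month is NOVEMBRO and the overlap starts at the head
          have hnov8 : nov8 <+: (c :: t) := (show nov8 <+: pvNOV by decide).trans hN
          have hsame : (c :: rest, num) = (nov8, ['1','1']) := by
            rcases List.prefix_or_prefix_of_prefix hpref hnov8 with hcase | hcase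
            · exact factPP _ hmemL _ (by decide) hcase
            · exact (factPP _ (by decide) _ hmemL hcase).symm
          have hname : c :: rest = nov8 := congrArg Prod.fst hsame
          have hnum : num = ['1','1'] := congrArg Prod.snd hsame
          have hut : ut6 <+: u := by
            have : nov8 ++ ut6 <+: nov8 ++ u := by
              rw [show nov8 ++ ut6 = pvNOV by decide, ← hname]
              rw [show (c :: rest) ++ u = c :: t by rw [List.cons_append, hu]]
              exact hN
            exact (List.prefix_append_right_inj _).mp this
          obtain ⟨v, hv⟩ := hut
          have hlist : c :: t = nov8 ++ (ut6 ++ v) := by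
            rw [← hu, ← hname, hv]
            exact List.cons_append.symm
          obtain ⟨z, hz⟩ := tightHeadN v
          rw [pvScan, htry, hnum, hlist, hz]
          intro heq
          exact absurd (List.cons.inj heq).1 (by decide)
        · by_cases hD : pvDEZ <+: (c :: t)
          · have hdez8 : dez8 <+: (c :: t) := (show dez8 <+: pvDEZ by decide).trans hD
            have hsame : (c :: rest, num) = (dez8, ['1','2']) := by
              rcases List.prefix_or_prefix_of_prefix hpref hdez8 with hcase | hcase
              · exact factPP _ hmemL _ (by decide) hcase
              · exact (factPP _ (by decide) _ hmemL hcase).symm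
            have hname : c :: rest = dez8 := congrArg Prod.fst hsame
            have hnum : num = ['1','2'] := congrArg Prod.snd hsame
            have hut : ut6 <+: u := by
              have : dez8 ++ ut6 <+: dez8 ++ u := by
                rw [show dez8 ++ ut6 = pvDEZ by decide, ← hname]
                rw [show (c :: rest) ++ u = c :: t by rw [List.cons_append, hu]]
                exact hD
              exact (List.prefix_append_right_inj _).mp this
            obtain ⟨v, hv⟩ := hut
            have hlist : c :: t = dez8 ++ (ut6 ++ v) := by
              rw [← hu, ← hname, hv]
              exact List.cons_append.symm
            obtain ⟨z, hz⟩ := tightHeadD v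
            rw [pvScan, htry, hnum, hlist, hz]
            intro heq
            exact absurd (List.cons.inj heq).1 (by decide)
          · -- the overlap lies entirely in the tail: both sides take the same step
            obtain ⟨nidx, hn, hgetn⟩ := List.mem_iff_getElem.mp hmemL
            have hn12 : nidx < 12 := by
              have : pvMonthsL.length = 12 := by simp [pvMonthsL, pvMonths]
              omega
            set i : Fin 12 := ⟨nidx, hn12⟩ with hi
            have hpv : pvNth i = (c :: rest, num) := by
              rw [pvNth]; exact hgetn
            have hct : c :: t = (pvNth i).1 ++ u := by
              rw [hpv, ← hu]; rfl
            have hdrop : t.drop rest.length = u := by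
              rw [← hu]; exact List.drop_left
            have hulen : u.length ≤ n := by
              have h1 : t.length ≤ n := by simpa using Nat.lt_succ_iff.mp (by simpa using h)
              have h2 : u.length ≤ t.length := by rw [← hu]; simp
              omega
            have hubad : pvBad u :=
              bad_inside i u (hct ▸ hb) (hct ▸ hN) (hct ▸ hD)
            rw [pvScan, htry]
            simp only [hdrop]
            rw [hct, pvStep i u ⟨hct ▸ hN, hct ▸ hD⟩, hpv]
            intro heq
            exact ih u hulen hubad (List.append_cancel_left heq)

-- the two ports agree with their list-level models
lemma A_toList (s : String) :
    (transform_month_names_to_numbers s).toList = pvFoldRepl pvMonthsL s.toList := by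
  simp only [transform_month_names_to_numbers, PySem.List.enumerate, List.foldl_cons,
    List.foldl_nil, PySem.Str.toList_replace, pvFoldRepl, pvMonthsL, pvMonths, pvRepl,
    List.map_cons, List.map_nil]
  rfl

lemma B_toList (s : String) :
    (transform_month_names_to_numbers_alt s).toList = pvScan s.toList := by
  simp [transform_month_names_to_numbers_alt, String.toList_ofList]

-- ===== VERDICT (by name: the statement is the Claim_ definition above) =====
theorem transform_month_names_to_numbers_spec : Claim_unchanged_transform_month_names_to_numbers := by
  intro s _ hD
  rw [← String.toList_inj, A_toList, B_toList]
  exact pvMain s.toList.length s.toList (le_refl _) (fun hb => hD ((pvBadScan_iff _).mpr hb))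

set_option maxRecDepth 100000 in
set_option maxHeartbeats 1000000 in
theorem transform_month_names_to_numbers_tight : Claim_exact_transform_month_names_to_numbers := by
  intro s _ hD heq
  have h1 : (transform_month_names_to_numbers s).toList
      = (transform_month_names_to_numbers_alt s).toList := by rw [heq]
  rw [A_toList, B_toList] at h1
  exact pvTight s.toList.length s.toList (le_refl _) ((pvBadScan_iff _).mp hD) h1

theorem transform_month_names_to_numbers_changed : Claim_changed_transform_month_names_to_numbers := by
  unfold Claim_changed_transform_month_names_to_numbers
  refine ⟨by decide, by decide, ?_, ?_, by decide⟩
  · rw [← String.toList_inj, A_toList]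
    decide
  · rw [← String.toList_inj, B_toList]
    simp [pvScan, pvTryMonth, pvMonths, pvDiffWitness_transform_month_names_to_numbers,
      pvDiffWitnessOut_transform_month_names_to_numbers]
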